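-- pv_equiv track=rewrite | github.com/seeM/advent-of-code-2018 | day_06.py | build_safe_region
-- ===== SOURCE A (Python) =====
-- from typing import Dict, List, Set, Tuple
--
-- Point = Tuple[int, int]
--
-- def grid_bounds(coords: List[Point]) -> Tuple[Point, Point]:
--     xs: List[int] = []
--     ys: List[int] = []
--     for x, y in coords:
--         xs.append(x)
--         ys.append(y)
--
--     x_min = min(xs)
--     x_max = max(xs)
--     y_min = min(ys)
--     y_max = max(ys)
--
--     return (x_min, y_min), (x_max, y_max)
--
-- def manhatten(point1: Point, point2: Point) -> int:
--     x1, y1 = point1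
--     x2, y2 = point2
--     return abs(x2 - x1) + abs(y2 - y1)
--
-- def build_safe_region(coords: List[Point], threshold: int = 10_000) -> Set[Point]:
--     (x_min, y_min), (x_max, y_max) = grid_bounds(coords)
--
--     # Start one to the left of x_min and end one to the right of x_max
--     region: Set[Point] = set()
--     for x in range(x_min - 1, x_max + 2):
--         # Start one to the left of y_min and end one to the right of y_max
--         for y in range(y_min - 1, y_max + 2):
--             point = (x, y)
--             dist = sum(manhatten(point, coord) for coord in coords)
--             if dist < threshold:
--                 region.add(point)
--
--     return region
-- ===== SOURCE B (Python) =====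
-- def build_safe_region(coords, threshold=10_000):
--     xs = [x for x, _ in coords]
--     ys = [y for _, y in coords]
--     x_lo, x_hi = min(xs) - 1, max(xs) + 2
--     y_lo, y_hi = min(ys) - 1, max(ys) + 2
--     # Manhattan distance separates: precompute per-column and per-row totals once.
--     col = [sum(abs(x - xi) for xi in xs) for x in range(x_lo, x_hi)]
--     row = [sum(abs(y - yi) for yi in ys) for y in range(y_lo, y_hi)]
--     return {(x, y)
--             for x, cx in zip(range(x_lo, x_hi), col)
--             for y, ry in zip(range(y_lo, y_hi), row)
--             if cx + ry < threshold}
-- ===== Notes on version B (the rewrite author's own statement) =====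
-- stated objective: faster
-- what changed: Splits the Manhattan distance into independent x and y parts, precomputing per-column and per-row distance totals once and zipping them with the ranges, so the per-cell work drops from a scan over all coords to one addition.
import Mathlib
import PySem

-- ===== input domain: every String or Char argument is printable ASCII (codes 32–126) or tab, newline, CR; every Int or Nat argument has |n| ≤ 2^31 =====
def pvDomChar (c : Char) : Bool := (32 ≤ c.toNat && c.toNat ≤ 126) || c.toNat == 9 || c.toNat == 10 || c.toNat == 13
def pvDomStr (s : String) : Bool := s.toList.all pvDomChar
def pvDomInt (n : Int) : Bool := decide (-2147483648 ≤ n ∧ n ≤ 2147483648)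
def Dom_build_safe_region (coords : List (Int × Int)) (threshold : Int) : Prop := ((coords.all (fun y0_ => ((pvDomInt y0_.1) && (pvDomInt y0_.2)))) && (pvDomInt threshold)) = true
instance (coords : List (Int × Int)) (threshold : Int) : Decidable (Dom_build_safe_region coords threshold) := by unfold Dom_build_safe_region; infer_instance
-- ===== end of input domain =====

-- B precomputes per-column and per-row Manhattan distance totals once, then combines them per cell.

-- ===== PORT A =====
def pv_grid_bounds (coords : List (Int × Int)) : Option ((Int × Int) × (Int × Int)) :=
  let xs := coords.foldl (fun a p => a ++ [p.1]) []
  let ys := coords.foldl (fun a p => a ++ [p.2]) []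
  match PySem.List.min? xs (fun v => v), PySem.List.max? xs (fun v => v),
        PySem.List.min? ys (fun v => v), PySem.List.max? ys (fun v => v) with
  | some x_min, some x_max, some y_min, some y_max => some ((x_min, y_min), (x_max, y_max))
  | _, _, _, _ => none   -- Python raises ValueError (min of empty sequence); excluded by Pre_

def pv_manhatten (point1 point2 : Int × Int) : Int :=
  |point2.1 - point1.1| + |point2.2 - point1.2|

def build_safe_region (coords : List (Int × Int)) (threshold : Int) : List (Int × Int) :=
  match pv_grid_bounds coords with
  | none => []   -- unreachable under Pre_ (Python raises ValueError)
  | some ((x_min, y_min), (x_max, y_max)) =>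
    (PySem.List.pyRange (x_min - 1) (x_max + 2) 1).foldl (fun region x =>
      (PySem.List.pyRange (y_min - 1) (y_max + 2) 1).foldl (fun region y =>
        let point := (x, y)
        let dist := (coords.map (fun coord => pv_manhatten point coord)).foldl (· + ·) 0
        if dist < threshold then PySem.Set.add region point else region) region)
      PySem.Set.empty

-- ===== PORT B =====
def pv_absSum (v : Int) (l : List Int) : Int :=
  (l.map (fun w => |v - w|)).foldl (· + ·) 0

def build_safe_region_alt (coords : List (Int × Int)) (threshold : Int) : List (Int × Int) :=
  let xs := coords.map (fun p => p.1)
  let ys := coords.map (fun p => p.2)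
  match PySem.List.min? xs (fun v => v), PySem.List.max? xs (fun v => v),
        PySem.List.min? ys (fun v => v), PySem.List.max? ys (fun v => v) with
  | some xm, some xM, some ym, some yM =>
    let x_lo := xm - 1; let x_hi := xM + 2
    let y_lo := ym - 1; let y_hi := yM + 2
    let col := (PySem.List.pyRange x_lo x_hi 1).map (fun x => pv_absSum x xs)
    let row := (PySem.List.pyRange y_lo y_hi 1).map (fun y => pv_absSum y ys)
    ((PySem.List.pyRange x_lo x_hi 1).zip col).foldl (fun s xc =>
      ((PySem.List.pyRange y_lo y_hi 1).zip row).foldl (fun s yr =>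
        if xc.2 + yr.2 < threshold then PySem.Set.add s (xc.1, yr.1) else s) s)
      PySem.Set.empty
  | _, _, _, _ => []   -- unreachable under Pre_ (Python raises ValueError)

-- ===== PRECONDITION & SPEC =====
-- Pre_ excludes the empty coordinate list, on which Python's min() raises ValueError (in both A and B).
def Pre_build_safe_region (coords : List (Int × Int)) (threshold : Int) : Prop := coords ≠ []
instance (coords : List (Int × Int)) (threshold : Int) : Decidable (Pre_build_safe_region coords threshold) := by unfold Pre_build_safe_region; infer_instance
def pvWitness_build_safe_region : (List (Int × Int)) × Int := ([(0, 0), (2, 1)], 5)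

def Spec_build_safe_region (coords : List (Int × Int)) (threshold : Int) (out : List (Int × Int)) : Prop := out = build_safe_region_alt coords threshold
instance (coords : List (Int × Int)) (threshold : Int) (out : List (Int × Int)) : Decidable (Spec_build_safe_region coords threshold out) := by unfold Spec_build_safe_region; infer_instance

-- ===== CLAIM (what is proved, stated in full; the proofs are below) =====
def Claim_equal_build_safe_region : Prop := ∀ (coords : List (Int × Int)) (threshold : Int), Dom_build_safe_region coords threshold → Pre_build_safe_region coords threshold → Spec_build_safe_region coords threshold (build_safe_region coords threshold)

-- ===== LEMMAS AND PROOFS =====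

-- the append-in-a-loop list of A's grid_bounds is a map
theorem pv_foldl_append_fst (coords : List (Int × Int)) (acc : List Int) :
    coords.foldl (fun a p => a ++ [p.1]) acc = acc ++ coords.map (fun p => p.1) := by
  induction coords generalizing acc with
  | nil => simp
  | cons c t ih => simp [ih]

theorem pv_foldl_append_snd (coords : List (Int × Int)) (acc : List Int) :
    coords.foldl (fun a p => a ++ [p.2]) acc = acc ++ coords.map (fun p => p.2) := by
  induction coords generalizing acc with
  | nil => simp
  | cons c t ih => simp [ih]

theorem pv_foldl_add_eq (l : List Int) (init : Int) :
    l.foldl (· + ·) init = init + l.sum := by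
  induction l generalizing init with
  | nil => simp
  | cons a t ih => simp [ih]; ring

-- Manhattan sums separate into x and y parts
theorem pv_split_sum (coords : List (Int × Int)) (x y : Int) :
    (coords.map (fun coord => pv_manhatten (x, y) coord)).foldl (· + ·) 0 =
      pv_absSum x (coords.map (fun p => p.1)) + pv_absSum y (coords.map (fun p => p.2)) := by
  simp only [pv_absSum, pv_foldl_add_eq, zero_add, List.map_map]
  induction coords with
  | nil => simp
  | cons c t ih =>
    simp only [List.map_cons, List.sum_cons, ih]
    have h : pv_manhatten (x, y) c = |x - c.1| + |y - c.2| := by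
      simp only [pv_manhatten]
      rw [abs_sub_comm c.1 x, abs_sub_comm c.2 y]
    rw [h]; simp only [Function.comp_apply]; ring

-- zipping a list with its own map pairs each element with its image
theorem pv_zip_map (l : List Int) (f : Int → Int) :
    l.zip (l.map f) = l.map (fun x => (x, f x)) := by
  induction l with
  | nil => rfl
  | cons a t ih => simp [ih]

-- ===== VERDICT (by name: the statement is the Claim_ definition above) =====
theorem build_safe_region_spec : Claim_equal_build_safe_region := by
  intro coords threshold _ hpre
  unfold Spec_build_safe_region build_safe_region build_safe_region_alt pv_grid_bounds
  simp only [pv_foldl_append_fst, pv_foldl_append_snd, List.nil_append]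
  rcases hmin : PySem.List.min? (coords.map (fun p => p.1)) (fun v => v) with _ | xm
  · exact absurd (List.map_eq_nil_iff.mp ((PySem.List.min?_eq_none_iff _ _).mp hmin)) hpre
  rcases hmax : PySem.List.max? (coords.map (fun p => p.1)) (fun v => v) with _ | xM
  · exact absurd (List.map_eq_nil_iff.mp ((PySem.List.max?_eq_none_iff _ _).mp hmax)) hpre
  rcases hmin' : PySem.List.min? (coords.map (fun p => p.2)) (fun v => v) with _ | ym
  · exact absurd (List.map_eq_nil_iff.mp ((PySem.List.min?_eq_none_iff _ _).mp hmin')) hpre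
  rcases hmax' : PySem.List.max? (coords.map (fun p => p.2)) (fun v => v) with _ | yM
  · exact absurd (List.map_eq_nil_iff.mp ((PySem.List.max?_eq_none_iff _ _).mp hmax')) hpre
  rw [hmin, hmax, hmin', hmax']
  simp only [pv_zip_map, List.foldl_map]
  apply PySem.List.foldl_congr_mem
  intro acc x _
  apply PySem.List.foldl_congr_mem
  intro acc' y _
  have h : List.foldl (fun a c => a + pv_manhatten (x, y) c) 0 coords
      = pv_absSum x (coords.map (fun p => p.1)) + pv_absSum y (coords.map (fun p => p.2)) := by
    rw [← pv_split_sum coords x y, ← List.foldl_map]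
  rw [h]
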